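-- pv_equiv track=rewrite | github.com/devnullnoop/MGCP | src/mgcp/rem_config.py | _is_due_fibonacci
-- ===== SOURCE A (Python) =====
-- _FIBONACCI = [5, 8, 13, 21, 34, 55, 89, 144, 233, 377, 610, 987]
--
-- def _is_due_fibonacci(current: int, last_run: int) -> bool:
--     """Fibonacci: due at fibonacci-numbered sessions (5, 8, 13, 21, ...)."""
--     for fib in _FIBONACCI:
--         if fib > last_run and fib <= current:
--             return True
--     # Extend if needed
--     if current > _FIBONACCI[-1]:
--         a, b = _FIBONACCI[-2], _FIBONACCI[-1]
--         while b <= current: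
--             a, b = b, a + b
--             if b > last_run and b <= current:
--                 return True
--     return False
-- ===== SOURCE B (Python) =====
-- def _is_due_fibonacci(current: int, last_run: int) -> bool:
--     """Fibonacci: due at fibonacci-numbered sessions (5, 8, 13, 21, ...)."""
--     return _count_fibs_upto(current) > _count_fibs_upto(last_run)
--
--
-- def _count_fibs_upto(x: int) -> int:
--     """Number of Fibonacci numbers in the sequence 5, 8, 13, 21, ... that are <= x."""
--     n, a, b = 0, 5, 8
--     while a <= x:
--         n, a, b = n + 1, b, a + b
--     return n
-- ===== Notes on version B (the rewrite author's own statement) =====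
-- stated objective: simpler
-- what changed: Replaces A's interval-membership scan (table pass plus a separate extension loop testing each Fibonacci number against (last_run, current]) by computing a monotone prefix-count of Fibonacci numbers <= x at each endpoint and comparing the two counts; B never tests any number against the interval.
import Mathlib
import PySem

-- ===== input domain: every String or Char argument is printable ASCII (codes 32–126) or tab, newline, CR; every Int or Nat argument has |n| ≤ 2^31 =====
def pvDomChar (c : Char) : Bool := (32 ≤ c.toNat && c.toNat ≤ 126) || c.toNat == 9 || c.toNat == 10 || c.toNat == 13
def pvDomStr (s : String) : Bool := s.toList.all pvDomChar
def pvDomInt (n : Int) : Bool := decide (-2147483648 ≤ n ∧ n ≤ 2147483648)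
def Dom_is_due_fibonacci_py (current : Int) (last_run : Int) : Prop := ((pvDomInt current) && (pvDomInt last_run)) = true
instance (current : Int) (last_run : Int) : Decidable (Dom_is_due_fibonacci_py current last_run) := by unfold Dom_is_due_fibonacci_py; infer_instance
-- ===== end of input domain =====

-- B replaces A's interval-membership scan by comparing the prefix-counts of
-- Fibonacci numbers ≤ current and ≤ last_run; objective: simpler decomposition.

-- ===== PORT A =====
-- the module constant _FIBONACCI
def pvFibTable : List Int := [5, 8, 13, 21, 34, 55, 89, 144, 233, 377, 610, 987]

-- the 'for fib in _FIBONACCI: if fib > last_run and fib <= current: return True' loop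
def pvScanA (last_run : Int) (current : Int) : List Int → Bool
  | [] => false
  | f :: rest =>
      if f > last_run ∧ f ≤ current then true else pvScanA last_run current rest

-- the 'while b <= current: a, b = b, a + b; if …: return True' extension loop;
-- fuel is a totality guard only: b grows by at least 1 each iteration, so
-- (current - 987).toNat + 1 steps are never exhausted when started at b = 987.
def pvExtLoop (last_run : Int) (current : Int) : Nat → Int → Int → Bool
  | 0, _, _ => false
  | Nat.succ n, a, b =>
      if b ≤ current then
        -- a, b = b, a + b; then the membership test on the new b
        if a + b > last_run ∧ a + b ≤ current then true
        else pvExtLoop last_run current n b (a + b)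
      else false

def is_due_fibonacci_py (current : Int) (last_run : Int) : Bool :=
  if pvScanA last_run current pvFibTable then true
  else if current > 987 then
    pvExtLoop last_run current ((current - 987).toNat + 1) 610 987
  else false

-- ===== PORT B =====
-- the 'n, a, b = 0, 5, 8; while a <= x: n, a, b = n + 1, b, a + b' loop of
-- Source B's _count_fibs_upto; fuel is a totality guard only: a grows by at least 1
-- each iteration, so (x - 5).toNat + 1 steps are never exhausted starting at a = 5.
def pvCountLoop (x : Int) : Nat → Int → Int → Int → Int
  | 0, n, _, _ => n
  | Nat.succ fuel, n, a, b =>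
      if a ≤ x then pvCountLoop x fuel (n + 1) b (a + b) else n

-- Source B's helper _count_fibs_upto
def pvCountFibsUpto (x : Int) : Int :=
  pvCountLoop x ((x - 5).toNat + 1) 0 5 8

def is_due_fibonacci_py_alt (current : Int) (last_run : Int) : Bool :=
  decide (pvCountFibsUpto current > pvCountFibsUpto last_run)

-- ===== PRECONDITION & SPEC =====
def Spec_is_due_fibonacci_py (current : Int) (last_run : Int) (out : Bool) : Prop := out = is_due_fibonacci_py_alt current last_run
instance (current : Int) (last_run : Int) (out : Bool) : Decidable (Spec_is_due_fibonacci_py current last_run out) := by unfold Spec_is_due_fibonacci_py; infer_instance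

-- ===== CLAIM (what is proved, stated in full; the proofs are below) =====
def Claim_equal_is_due_fibonacci_py : Prop := ∀ (current : Int) (last_run : Int), Dom_is_due_fibonacci_py current last_run → Spec_is_due_fibonacci_py current last_run (is_due_fibonacci_py current last_run)

-- ===== LEMMAS AND PROOFS =====

-- Proof-only intermediate: a single scan of the Fibonacci sequence from (5, 8)
-- testing membership in (l, c]; A is reduced to it, and it is reduced to B.
def pvAltLoop (last_run : Int) (current : Int) : Nat → Int → Int → Bool
  | 0, _, _ => false
  | Nat.succ n, a, b =>
      if a ≤ current then
        if a > last_run then true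
        else pvAltLoop last_run current n b (a + b)
      else false

-- (if p then true else x) = decide p || x, used to normalise A's scan
lemma pvIfOr (p : Prop) [Decidable p] (x : Bool) :
    (if p then true else x) = (decide p || x) := by
  split_ifs <;> simp_all

-- The scan loop returns false once its cursor has passed current.
lemma pvAltLoop_dead (l c : Int) (n : Nat) (a b : Int) (h : c < a) :
    pvAltLoop l c n a b = false := by
  cases n with
  | zero => rfl
  | succ n => simp [pvAltLoop]; omega

-- With enough fuel, the scan loop does not depend on the exact fuel value.
lemma pvAltLoop_congr (l c : Int) :
    ∀ (n m : Nat) (a b : Int), 0 < a → a < b → c - a < n → c - a < m →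
      pvAltLoop l c n a b = pvAltLoop l c m a b := by
  intro n
  induction n with
  | zero =>
      intro m a b _ _ hn _
      rw [pvAltLoop_dead l c 0 a b (by omega), pvAltLoop_dead l c m a b (by omega)]
  | succ n ih =>
      intro m a b ha hab hn hm
      cases m with
      | zero =>
          rw [pvAltLoop_dead l c 0 a b (by omega),
            pvAltLoop_dead l c (n + 1) a b (by omega)]
      | succ m =>
          simp only [pvAltLoop]
          by_cases h1 : a ≤ c
          · by_cases h2 : a > l
            · simp [h1, h2]
            · rw [if_pos h1, if_pos h1, if_neg h2, if_neg h2]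
              exact ih m b (a + b) (by omega) (by omega) (by omega) (by omega)
          · simp [h1]

-- A's extension loop started at (a, b) agrees with the scan loop started at (a+b, a+2b).
lemma pvExt_eq_alt (l c : Int) :
    ∀ (n : Nat) (a b : Int), 0 < a → a < b →
      pvExtLoop l c n a b = pvAltLoop l c n (a + b) (a + 2 * b) := by
  intro n
  induction n with
  | zero => intro a b _ _; rfl
  | succ n ih =>
      intro a b ha hab
      simp only [pvExtLoop, pvAltLoop]
      by_cases h1 : a + b ≤ c
      · have hb : b ≤ c := by omega
        by_cases h2 : a + b > l
        · simp [hb, h1, h2]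
        · rw [ih b (a + b) (by omega) (by omega),
            if_pos hb, if_neg (show ¬ (a + b > l ∧ a + b ≤ c) by tauto),
            if_pos h1, if_neg h2]
          congr 1 <;> ring
      · by_cases hb : b ≤ c
        · rw [if_pos hb, if_neg (show ¬ (a + b > l ∧ a + b ≤ c) by tauto),
            if_neg h1, ih b (a + b) (by omega) (by omega),
            pvAltLoop_dead l c n (b + (a + b)) _ (by omega)]
        · rw [if_neg hb, if_neg (show ¬ a + b ≤ c by omega)]

-- Peeling one step off the scan loop.
lemma pvAltLoop_step (l c : Int) (n : Nat) (a b : Int) (_ha : 0 < a) (hab : a < b) :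
    pvAltLoop l c (n + 1) a b = (decide (a > l ∧ a ≤ c) || pvAltLoop l c n b (a + b)) := by
  simp only [pvAltLoop]
  by_cases h1 : a ≤ c
  · by_cases h2 : a > l
    · simp [h1, h2]
    · simp [h1, h2]
  · rw [if_neg h1, pvAltLoop_dead l c n b (a + b) (by omega)]
    simp [h1]

-- Twelve peeled steps of the scan loop are exactly A's table scan.
lemma pvAltLoop_peel12 (l c : Int) (n : Nat) :
    pvAltLoop l c (n + 12) 5 8 = (pvScanA l c pvFibTable || pvAltLoop l c n 1597 2584) := by
  rw [show n + 12 = (n + 11) + 1 by omega,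
    pvAltLoop_step l c _ 5 8 (by norm_num) (by norm_num), show (5:Int) + 8 = 13 by norm_num,
    show n + 11 = (n + 10) + 1 by omega,
    pvAltLoop_step l c _ 8 13 (by norm_num) (by norm_num), show (8:Int) + 13 = 21 by norm_num,
    show n + 10 = (n + 9) + 1 by omega,
    pvAltLoop_step l c _ 13 21 (by norm_num) (by norm_num), show (13:Int) + 21 = 34 by norm_num,
    show n + 9 = (n + 8) + 1 by omega,
    pvAltLoop_step l c _ 21 34 (by norm_num) (by norm_num), show (21:Int) + 34 = 55 by norm_num,
    show n + 8 = (n + 7) + 1 by omega,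
    pvAltLoop_step l c _ 34 55 (by norm_num) (by norm_num), show (34:Int) + 55 = 89 by norm_num,
    show n + 7 = (n + 6) + 1 by omega,
    pvAltLoop_step l c _ 55 89 (by norm_num) (by norm_num), show (55:Int) + 89 = 144 by norm_num,
    show n + 6 = (n + 5) + 1 by omega,
    pvAltLoop_step l c _ 89 144 (by norm_num) (by norm_num), show (89:Int) + 144 = 233 by norm_num,
    show n + 5 = (n + 4) + 1 by omega,
    pvAltLoop_step l c _ 144 233 (by norm_num) (by norm_num), show (144:Int) + 233 = 377 by norm_num,
    show n + 4 = (n + 3) + 1 by omega,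
    pvAltLoop_step l c _ 233 377 (by norm_num) (by norm_num), show (233:Int) + 377 = 610 by norm_num,
    show n + 3 = (n + 2) + 1 by omega,
    pvAltLoop_step l c _ 377 610 (by norm_num) (by norm_num), show (377:Int) + 610 = 987 by norm_num,
    show n + 2 = (n + 1) + 1 by omega,
    pvAltLoop_step l c _ 610 987 (by norm_num) (by norm_num), show (610:Int) + 987 = 1597 by norm_num,
    pvAltLoop_step l c _ 987 1597 (by norm_num) (by norm_num), show (987:Int) + 1597 = 2584 by norm_num]
  simp only [pvScanA, pvFibTable, pvIfOr, Bool.or_assoc]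
  rfl

-- A equals the single scan loop started at (5, 8).
lemma pvA_eq_scan (c l : Int) :
    is_due_fibonacci_py c l = pvAltLoop l c ((c - 5).toNat + 1) 5 8 := by
  unfold is_due_fibonacci_py
  rw [pvAltLoop_congr l c ((c - 5).toNat + 1) (((c - 5).toNat + 1) + 12) 5 8
      (by omega) (by omega) (by omega) (by omega),
    pvAltLoop_peel12 l c ((c - 5).toNat + 1)]
  by_cases hscan : pvScanA l c pvFibTable
  · simp [hscan]
  · simp only [Bool.not_eq_true] at hscan
    rw [hscan, if_neg Bool.false_ne_true]
    simp only [Bool.false_or]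
    by_cases hc : c > 987
    · rw [if_pos hc, pvExt_eq_alt l c _ 610 987 (by norm_num) (by norm_num),
        show (610 : Int) + 987 = 1597 by norm_num, show (610 : Int) + 2 * 987 = 2584 by norm_num]
      exact pvAltLoop_congr l c _ _ 1597 2584 (by norm_num) (by norm_num) (by omega) (by omega)
    · rw [if_neg hc, pvAltLoop_dead l c _ 1597 2584 (by omega)]

-- The counting loop's accumulator shifts out.
lemma pvCountLoop_acc (x : Int) :
    ∀ (f : Nat) (n a b : Int), pvCountLoop x f n a b = n + pvCountLoop x f 0 a b := by
  intro f
  induction f with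
  | zero => intro n a b; simp [pvCountLoop]
  | succ f ih =>
      intro n a b
      simp only [pvCountLoop]
      by_cases h : a ≤ x
      · rw [if_pos h, if_pos h, ih (n + 1), ih (0 + 1)]; omega
      · rw [if_neg h, if_neg h]; omega

-- The counting loop is nonnegative from a zero accumulator.
lemma pvCountLoop_nonneg (x : Int) :
    ∀ (f : Nat) (a b : Int), 0 ≤ pvCountLoop x f 0 a b := by
  intro f
  induction f with
  | zero => intro a b; simp [pvCountLoop]
  | succ f ih =>
      intro a b
      simp only [pvCountLoop]
      by_cases h : a ≤ x
      · rw [if_pos h, pvCountLoop_acc]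
        have := ih b (a + b); omega
      · rw [if_neg h]

-- The counting loop returns its accumulator once the cursor has passed x.
lemma pvCountLoop_dead (x : Int) (f : Nat) (a b : Int) (h : x < a) :
    pvCountLoop x f 0 a b = 0 := by
  cases f with
  | zero => rfl
  | succ f => simp only [pvCountLoop]; rw [if_neg (by omega)]

-- With enough fuel, the counting loop does not depend on the exact fuel value.
lemma pvCountLoop_congr (x : Int) :
    ∀ (f m : Nat) (a b : Int), 0 < a → a < b → x - a < f → x - a < m →
      pvCountLoop x f 0 a b = pvCountLoop x m 0 a b := by
  intro f
  induction f with
  | zero =>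
      intro m a b _ _ hf _
      rw [pvCountLoop_dead x 0 a b (by omega), pvCountLoop_dead x m a b (by omega)]
  | succ f ih =>
      intro m a b ha hab hf hm
      cases m with
      | zero =>
          rw [pvCountLoop_dead x 0 a b (by omega),
            pvCountLoop_dead x (f + 1) a b (by omega)]
      | succ m =>
          simp only [pvCountLoop]
          by_cases h : a ≤ x
          · rw [if_pos h, if_pos h, pvCountLoop_acc x f, pvCountLoop_acc x m,
              ih m b (a + b) (by omega) (by omega) (by omega) (by omega)]
          · rw [if_neg h, if_neg h]

-- Main bridge: the membership scan of (l, c] equals comparing the two prefix counts,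
-- when both are run with the same sufficient fuel.
lemma pvScan_eq_count (l c : Int) :
    ∀ (f : Nat) (a b : Int), 0 < a → a < b → c - a < f → l - a < f →
      pvAltLoop l c f a b = decide (pvCountLoop c f 0 a b > pvCountLoop l f 0 a b) := by
  intro f
  induction f with
  | zero =>
      intro a b _ _ hc hl
      rw [pvAltLoop_dead l c 0 a b (by omega)]
      simp [pvCountLoop]
  | succ f ih =>
      intro a b ha hab hc hl
      have hC : pvCountLoop c (f + 1) 0 a b
          = (if a ≤ c then 1 + pvCountLoop c f 0 b (a + b) else 0) := by
        simp only [pvCountLoop]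
        split_ifs
        · rw [pvCountLoop_acc]; omega
        · rfl
      have hL : pvCountLoop l (f + 1) 0 a b
          = (if a ≤ l then 1 + pvCountLoop l f 0 b (a + b) else 0) := by
        simp only [pvCountLoop]
        split_ifs
        · rw [pvCountLoop_acc]; omega
        · rfl
      have hcn := pvCountLoop_nonneg c f b (a + b)
      have hln := pvCountLoop_nonneg l f b (a + b)
      simp only [pvAltLoop, hC, hL]
      by_cases h1 : a ≤ c
      · by_cases h2 : a > l
        · have hld : pvCountLoop l f 0 b (a + b) = 0 :=
            pvCountLoop_dead l f b (a + b) (by omega)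
          simp only [if_pos h1, if_pos h2, if_neg (show ¬ a ≤ l by omega), hld]
          rw [eq_comm, decide_eq_true_eq]
          omega
        · have h3 : a ≤ l := by omega
          rw [if_pos h1, if_neg h2, if_pos h1, if_pos h3,
            ih b (a + b) (by omega) (by omega) (by omega) (by omega),
            decide_eq_decide]
          omega
      · rw [if_neg h1, if_neg h1]
        rw [eq_comm, decide_eq_false_iff_not]
        split_ifs <;> omega

-- ===== VERDICT (by name: the statement is the Claim_ definition above) =====
theorem is_due_fibonacci_py_spec : Claim_equal_is_due_fibonacci_py := by
  intro c l _
  unfold Spec_is_due_fibonacci_py is_due_fibonacci_py_alt pvCountFibsUpto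
  rw [pvA_eq_scan c l]
  -- a common sufficient fuel for both endpoints
  set F : Nat := (c - 5).toNat + (l - 5).toNat + 1 with hF
  rw [pvAltLoop_congr l c ((c - 5).toNat + 1) F 5 8 (by omega) (by omega) (by omega) (by omega),
    pvScan_eq_count l c F 5 8 (by omega) (by omega) (by omega) (by omega),
    pvCountLoop_congr c ((c - 5).toNat + 1) F 5 8 (by omega) (by omega) (by omega) (by omega),
    pvCountLoop_congr l ((l - 5).toNat + 1) F 5 8 (by omega) (by omega) (by omega) (by omega)]
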